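-- pv_equiv track=rewrite | github.com/jhao/School-Libray-Management | app/__init__.py | _resolve_active_section
-- ===== SOURCE A (Python) =====
-- NAV_SECTIONS = [
--     {
--         "key": "common",
--         "title": "借阅管理",
--         "items": [
--             {"endpoint": "stats.dashboard", "label": "统计分析"},
--             {"endpoint": "lending.borrow", "label": "借书"},
--             {"endpoint": "lending.return_book", "label": "还书"},
--             {"endpoint": "lending.records", "label": "借阅记录"},
--         ],
--         "prefixes": ["stats.", "lending."],
--     },
--     {
--         "key": "books",
--         "title": "图书管理",
--         "items": [
--             {"endpoint": "books.list_books", "label": "图书列表"},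
--             {"endpoint": "books.create_book", "label": "新增图书"},
--             {"endpoint": "categories.list_categories", "label": "分类列表"},
--             {"endpoint": "categories.create_category", "label": "新增分类"},
--         ],
--         "prefixes": ["books.", "categories."],
--     },
--     {
--         "key": "readers",
--         "title": "读者管理",
--         "items": [
--             {"endpoint": "readers.list_readers", "label": "读者列表"},
--             {"endpoint": "readers.create_reader", "label": "新增读者"},
--             {"endpoint": "readers.manage_grades", "label": "年级列表"},
--             {"endpoint": "readers.create_grade", "label": "新增年级"},
--             {"endpoint": "readers.manage_classes", "label": "班级列表"},
--             {"endpoint": "readers.create_class", "label": "新增班级"},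
--         ],
--         "prefixes": ["readers."],
--     },
--     {
--         "key": "system",
--         "title": "系统设置",
--         "items": [
--             {"endpoint": "system.list_users", "label": "用户列表"},
--             {"endpoint": "system.create_user", "label": "新增用户"},
--             {"endpoint": "system.system_settings", "label": "系统外观"},
--             {"endpoint": "system.backup_restore", "label": "备份与恢复"},
--             {"endpoint": "system.test_data", "label": "测试数据", "admin_only": True},
--         ],
--         "prefixes": ["system."],
--     },
-- ]
--
-- def _resolve_active_section(endpoint: str) -> str:
--     if not NAV_SECTIONS:
--         return ""
--     if not endpoint:
--         return NAV_SECTIONS[0]["key"]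
--     for section in NAV_SECTIONS:
--         if any(item["endpoint"] == endpoint for item in section["items"]):
--             return section["key"]
--     for section in NAV_SECTIONS:
--         for prefix in section.get("prefixes", []):
--             if endpoint.startswith(prefix):
--                 return section["key"]
--     return NAV_SECTIONS[0]["key"]
-- ===== SOURCE B (Python) =====
-- NAV_SECTIONS = [
--     {
--         "key": "common",
--         "title": "借阅管理",
--         "items": [
--             {"endpoint": "stats.dashboard", "label": "统计分析"},
--             {"endpoint": "lending.borrow", "label": "借书"},
--             {"endpoint": "lending.return_book", "label": "还书"},
--             {"endpoint": "lending.records", "label": "借阅记录"},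
--         ],
--         "prefixes": ["stats.", "lending."],
--     },
--     {
--         "key": "books",
--         "title": "图书管理",
--         "items": [
--             {"endpoint": "books.list_books", "label": "图书列表"},
--             {"endpoint": "books.create_book", "label": "新增图书"},
--             {"endpoint": "categories.list_categories", "label": "分类列表"},
--             {"endpoint": "categories.create_category", "label": "新增分类"},
--         ],
--         "prefixes": ["books.", "categories."],
--     },
--     {
--         "key": "readers",
--         "title": "读者管理",
--         "items": [
--             {"endpoint": "readers.list_readers", "label": "读者列表"},
--             {"endpoint": "readers.create_reader", "label": "新增读者"},
--             {"endpoint": "readers.manage_grades", "label": "年级列表"},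
--             {"endpoint": "readers.create_grade", "label": "新增年级"},
--             {"endpoint": "readers.manage_classes", "label": "班级列表"},
--             {"endpoint": "readers.create_class", "label": "新增班级"},
--         ],
--         "prefixes": ["readers."],
--     },
--     {
--         "key": "system",
--         "title": "系统设置",
--         "items": [
--             {"endpoint": "system.list_users", "label": "用户列表"},
--             {"endpoint": "system.create_user", "label": "新增用户"},
--             {"endpoint": "system.system_settings", "label": "系统外观"},
--             {"endpoint": "system.backup_restore", "label": "备份与恢复"},
--             {"endpoint": "system.test_data", "label": "测试数据", "admin_only": True},
--         ],
--         "prefixes": ["system."],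
--     },
-- ]
--
-- # Key observation: in NAV_SECTIONS the section is fully determined by the endpoint's
-- # blueprint module (the segment before the first dot): every item endpoint starts with
-- # one of its own section's prefixes, every prefix is exactly "<module>.", and no module
-- # appears in two sections.  So the whole exact-then-prefix resolution collapses to a
-- # single lookup of the module name; anything without a dot or with an unknown module
-- # falls back to the first section's key.
-- _MODULE_TO_KEY = {
--     "stats": "common",
--     "lending": "common",
--     "books": "books",
--     "categories": "books",
--     "readers": "readers",
--     "system": "system",
-- }
--
--
-- def _resolve_active_section(endpoint: str) -> str:
--     head, sep, _tail = endpoint.partition(".")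
--     if sep:
--         return _MODULE_TO_KEY.get(head, "common")
--     return "common"
-- ===== Notes on version B (the rewrite author's own statement) =====
-- stated objective: alternative
-- what changed: B drops both scans entirely: it partitions the endpoint at its first dot and resolves the section by a single lookup of the module name in a small module->key table (correct because in NAV_SECTIONS every item endpoint starts with one of its own section's prefixes, every prefix is exactly '<module>.', and no module occurs in two sections), falling back to the first section's key.
import Mathlib
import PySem

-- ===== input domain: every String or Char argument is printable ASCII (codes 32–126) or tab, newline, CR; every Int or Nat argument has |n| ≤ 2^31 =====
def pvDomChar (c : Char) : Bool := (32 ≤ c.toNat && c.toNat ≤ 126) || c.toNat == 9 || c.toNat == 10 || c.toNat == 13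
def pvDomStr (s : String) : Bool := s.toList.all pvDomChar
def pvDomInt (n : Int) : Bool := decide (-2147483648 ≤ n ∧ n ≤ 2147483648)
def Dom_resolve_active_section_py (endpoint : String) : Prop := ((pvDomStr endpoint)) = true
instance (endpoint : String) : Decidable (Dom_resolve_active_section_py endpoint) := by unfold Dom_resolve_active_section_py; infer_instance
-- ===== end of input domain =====

-- B replaces A's two scans (exact item match, then prefix match) by one partition at the
-- first dot and a single module-name lookup; same results on every string.

-- ===== PORT A =====
-- NAV_SECTIONS as (key, items as (endpoint, label), prefixes); titles/admin_only flags are unused and omitted.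
def navSections : List (String × List (String × String) × List String) := [
  ("common", [("stats.dashboard", "统计分析"), ("lending.borrow", "借书"), ("lending.return_book", "还书"), ("lending.records", "借阅记录")], ["stats.", "lending."]),
  ("books", [("books.list_books", "图书列表"), ("books.create_book", "新增图书"), ("categories.list_categories", "分类列表"), ("categories.create_category", "新增分类")], ["books.", "categories."]),
  ("readers", [("readers.list_readers", "读者列表"), ("readers.create_reader", "新增读者"), ("readers.manage_grades", "年级列表"), ("readers.create_grade", "新增年级"), ("readers.manage_classes", "班级列表"), ("readers.create_class", "新增班级")], ["readers."]),
  ("system", [("system.list_users", "用户列表"), ("system.create_user", "新增用户"), ("system.system_settings", "系统外观"), ("system.backup_restore", "备份与恢复"), ("system.test_data", "测试数据")], ["system."])]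

def resolve_active_section_py (endpoint : String) : String :=
  if navSections.isEmpty then ""
  else if endpoint = "" then (navSections.headD ("", [], [])).1
  else
    match navSections.find? (fun s => s.2.1.any (fun it => it.1 == endpoint)) with
    | some s => s.1
    | none =>
      match navSections.find? (fun s => s.2.2.any (fun p => PySem.Str.startswith endpoint p)) with
      | some s => s.1
      | none => (navSections.headD ("", [], [])).1

-- ===== PORT B =====
def moduleToKey : PySem.Dict String String :=
  PySem.Dict.mk [("stats", "common"), ("lending", "common"), ("books", "books"),
                 ("categories", "books"), ("readers", "readers"), ("system", "system")]

-- str.partition('.') ported by hand (exact): head = chars before the first '.',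
-- separator found ⇔ '.' occurs in the string.
def resolve_active_section_py_alt (endpoint : String) : String :=
  let l := endpoint.toList
  let head := String.ofList (l.takeWhile (fun c => !(c == '.')))
  if l.contains '.' then PySem.Dict.getD moduleToKey head "common"
  else "common"

-- ===== PRECONDITION & SPEC =====
def Spec_resolve_active_section_py (endpoint : String) (out : String) : Prop := out = resolve_active_section_py_alt endpoint
instance (endpoint : String) (out : String) : Decidable (Spec_resolve_active_section_py endpoint out) := by unfold Spec_resolve_active_section_py; infer_instance

-- ===== CLAIM (what is proved, stated in full; the proofs are below) =====
def Claim_equal_resolve_active_section_py : Prop := ∀ (endpoint : String), Dom_resolve_active_section_py endpoint → Spec_resolve_active_section_py endpoint (resolve_active_section_py endpoint)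

-- ===== LEMMAS AND PROOFS =====
-- 'l starts with p ++ "."' (p dot-free) ↔ 'the chunk before the first dot is p, and a dot occurs'.
theorem startswith_dot_iff (l p : List Char) (hp : '.' ∉ p) :
    PySem.Chars.startswith l (p ++ ['.']) = true ↔
      (l.takeWhile (fun c => !(c == '.')) = p ∧ '.' ∈ l) := by
  rw [PySem.Chars.startswith_iff]
  constructor
  · rintro ⟨rest, hrest⟩
    subst hrest
    refine ⟨?_, by simp⟩
    induction p with
    | nil => simp
    | cons a as ih =>
      have ha : a ≠ '.' := fun h => hp (h ▸ List.mem_cons_self)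
      simpa [List.takeWhile, ha] using ih (fun h => hp (List.mem_cons_of_mem _ h))
  · rintro ⟨htw, hdot⟩
    have hsplit := (List.takeWhile_append_dropWhile (p := fun c => !(c == '.')) (l := l)).symm
    have hd : l.dropWhile (fun c => !(c == '.')) ≠ [] := by
      intro hnil
      rw [hnil, List.append_nil] at hsplit
      have : '.' ∈ l.takeWhile (fun c => !(c == '.')) := hsplit ▸ hdot
      have := List.mem_takeWhile_imp this
      simp at this
    obtain ⟨d, ds, hds⟩ := List.exists_cons_of_ne_nil hd
    have hh : (l.dropWhile (fun c => !(c == '.'))).head hd = d := by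
      have h1 : (l.dropWhile (fun c => !(c == '.'))).head? = some d := by rw [hds]; rfl
      have h2 := List.head?_eq_head (l := l.dropWhile (fun c => !(c == '.'))) hd
      rw [h1] at h2; exact (Option.some.inj h2).symm
    have hdEq : d = '.' := by
      have hnp := List.head_dropWhile_not (p := fun c => !(c == '.')) (l := l) hd
      rw [hh] at hnp
      simpa using hnp
    exact ⟨ds, by rw [hsplit, htw, hds, hdEq]; simp⟩

-- a string-key beq fails when the candidate's char list differs
theorem beq_ofList_false (s : String) (tw : List Char) (h : tw ≠ s.toList) :
    (s == String.ofList tw) = false := by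
  refine beq_eq_false_iff_ne.mpr ?_
  intro he; apply h
  have := congrArg String.toList he
  simpa [String.toList_ofList] using this.symm

-- ===== VERDICT (by name: the statement is the Claim_ definition above) =====
theorem resolve_active_section_py_spec : Claim_equal_resolve_active_section_py := by
  intro e _
  unfold Spec_resolve_active_section_py resolve_active_section_py resolve_active_section_py_alt
  by_cases h0 : e = ""
  · subst h0; decide
  by_cases h1 : (("stats.dashboard" : String) == e) = true
  · have := (eq_of_beq h1).symm; subst this; decide
  rw [Bool.not_eq_true] at h1
  by_cases h2 : (("lending.borrow" : String) == e) = true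
  · have := (eq_of_beq h2).symm; subst this; decide
  rw [Bool.not_eq_true] at h2
  by_cases h3 : (("lending.return_book" : String) == e) = true
  · have := (eq_of_beq h3).symm; subst this; decide
  rw [Bool.not_eq_true] at h3
  by_cases h4 : (("lending.records" : String) == e) = true
  · have := (eq_of_beq h4).symm; subst this; decide
  rw [Bool.not_eq_true] at h4
  by_cases h5 : (("books.list_books" : String) == e) = true
  · have := (eq_of_beq h5).symm; subst this; decide
  rw [Bool.not_eq_true] at h5
  by_cases h6 : (("books.create_book" : String) == e) = true
  · have := (eq_of_beq h6).symm; subst this; decide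
  rw [Bool.not_eq_true] at h6
  by_cases h7 : (("categories.list_categories" : String) == e) = true
  · have := (eq_of_beq h7).symm; subst this; decide
  rw [Bool.not_eq_true] at h7
  by_cases h8 : (("categories.create_category" : String) == e) = true
  · have := (eq_of_beq h8).symm; subst this; decide
  rw [Bool.not_eq_true] at h8
  by_cases h9 : (("readers.list_readers" : String) == e) = true
  · have := (eq_of_beq h9).symm; subst this; decide
  rw [Bool.not_eq_true] at h9
  by_cases h10 : (("readers.create_reader" : String) == e) = true
  · have := (eq_of_beq h10).symm; subst this; decide
  rw [Bool.not_eq_true] at h10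
  by_cases h11 : (("readers.manage_grades" : String) == e) = true
  · have := (eq_of_beq h11).symm; subst this; decide
  rw [Bool.not_eq_true] at h11
  by_cases h12 : (("readers.create_grade" : String) == e) = true
  · have := (eq_of_beq h12).symm; subst this; decide
  rw [Bool.not_eq_true] at h12
  by_cases h13 : (("readers.manage_classes" : String) == e) = true
  · have := (eq_of_beq h13).symm; subst this; decide
  rw [Bool.not_eq_true] at h13
  by_cases h14 : (("readers.create_class" : String) == e) = true
  · have := (eq_of_beq h14).symm; subst this; decide
  rw [Bool.not_eq_true] at h14
  by_cases h15 : (("system.list_users" : String) == e) = true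
  · have := (eq_of_beq h15).symm; subst this; decide
  rw [Bool.not_eq_true] at h15
  by_cases h16 : (("system.create_user" : String) == e) = true
  · have := (eq_of_beq h16).symm; subst this; decide
  rw [Bool.not_eq_true] at h16
  by_cases h17 : (("system.system_settings" : String) == e) = true
  · have := (eq_of_beq h17).symm; subst this; decide
  rw [Bool.not_eq_true] at h17
  by_cases h18 : (("system.backup_restore" : String) == e) = true
  · have := (eq_of_beq h18).symm; subst this; decide
  rw [Bool.not_eq_true] at h18
  by_cases h19 : (("system.test_data" : String) == e) = true
  · have := (eq_of_beq h19).symm; subst this; decide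
  rw [Bool.not_eq_true] at h19
  by_cases h20 : PySem.Str.startswith e "stats." = true
  · have h20c : PySem.Chars.startswith e.toList (['s','t','a','t','s'] ++ ['.']) = true := by
      rw [← show ("stats." : String).toList = ['s','t','a','t','s'] ++ ['.'] from by decide]; simpa using h20
    obtain ⟨htw, hdot⟩ := (startswith_dot_iff e.toList ['s','t','a','t','s'] (by decide)).mp h20c
    have hc : e.toList.contains '.' = true := by simpa using hdot
    have hS : String.ofList ['s','t','a','t','s'] = "stats" := by decide
    simp [navSections, List.find?, moduleToKey, PySem.Dict.getD, PySem.Dict.get?,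
          h0, h1, h2, h3, h4, h5, h6, h7, h8, h9, h10, h11, h12, h13, h14, h15, h16, h17, h18, h19,
          htw, hS]
    all_goals simp_all
  rw [Bool.not_eq_true] at h20
  by_cases h21 : PySem.Str.startswith e "lending." = true
  · have h21c : PySem.Chars.startswith e.toList (['l','e','n','d','i','n','g'] ++ ['.']) = true := by
      rw [← show ("lending." : String).toList = ['l','e','n','d','i','n','g'] ++ ['.'] from by decide]; simpa using h21
    obtain ⟨htw, hdot⟩ := (startswith_dot_iff e.toList ['l','e','n','d','i','n','g'] (by decide)).mp h21c
    have hc : e.toList.contains '.' = true := by simpa using hdot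
    have hS : String.ofList ['l','e','n','d','i','n','g'] = "lending" := by decide
    simp [navSections, List.find?, moduleToKey, PySem.Dict.getD, PySem.Dict.get?,
          h0, h1, h2, h3, h4, h5, h6, h7, h8, h9, h10, h11, h12, h13, h14, h15, h16, h17, h18, h19,
          htw, hS]
    all_goals simp_all
  rw [Bool.not_eq_true] at h21
  by_cases h22 : PySem.Str.startswith e "books." = true
  · have h22c : PySem.Chars.startswith e.toList (['b','o','o','k','s'] ++ ['.']) = true := by
      rw [← show ("books." : String).toList = ['b','o','o','k','s'] ++ ['.'] from by decide]; simpa using h22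
    obtain ⟨htw, hdot⟩ := (startswith_dot_iff e.toList ['b','o','o','k','s'] (by decide)).mp h22c
    have hc : e.toList.contains '.' = true := by simpa using hdot
    have hS : String.ofList ['b','o','o','k','s'] = "books" := by decide
    simp [navSections, List.find?, moduleToKey, PySem.Dict.getD, PySem.Dict.get?,
          h0, h1, h2, h3, h4, h5, h6, h7, h8, h9, h10, h11, h12, h13, h14, h15, h16, h17, h18, h19,
          htw, hS]
    all_goals simp_all
  rw [Bool.not_eq_true] at h22
  by_cases h23 : PySem.Str.startswith e "categories." = true
  · have h23c : PySem.Chars.startswith e.toList (['c','a','t','e','g','o','r','i','e','s'] ++ ['.']) = true := by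
      rw [← show ("categories." : String).toList = ['c','a','t','e','g','o','r','i','e','s'] ++ ['.'] from by decide]; simpa using h23
    obtain ⟨htw, hdot⟩ := (startswith_dot_iff e.toList ['c','a','t','e','g','o','r','i','e','s'] (by decide)).mp h23c
    have hc : e.toList.contains '.' = true := by simpa using hdot
    have hS : String.ofList ['c','a','t','e','g','o','r','i','e','s'] = "categories" := by decide
    simp [navSections, List.find?, moduleToKey, PySem.Dict.getD, PySem.Dict.get?,
          h0, h1, h2, h3, h4, h5, h6, h7, h8, h9, h10, h11, h12, h13, h14, h15, h16, h17, h18, h19,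
          htw, hS]
    all_goals simp_all
  rw [Bool.not_eq_true] at h23
  by_cases h24 : PySem.Str.startswith e "readers." = true
  · have h24c : PySem.Chars.startswith e.toList (['r','e','a','d','e','r','s'] ++ ['.']) = true := by
      rw [← show ("readers." : String).toList = ['r','e','a','d','e','r','s'] ++ ['.'] from by decide]; simpa using h24
    obtain ⟨htw, hdot⟩ := (startswith_dot_iff e.toList ['r','e','a','d','e','r','s'] (by decide)).mp h24c
    have hc : e.toList.contains '.' = true := by simpa using hdot
    have hS : String.ofList ['r','e','a','d','e','r','s'] = "readers" := by decide
    simp [navSections, List.find?, moduleToKey, PySem.Dict.getD, PySem.Dict.get?,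
          h0, h1, h2, h3, h4, h5, h6, h7, h8, h9, h10, h11, h12, h13, h14, h15, h16, h17, h18, h19,
          htw, hS]
    all_goals simp_all
  rw [Bool.not_eq_true] at h24
  by_cases h25 : PySem.Str.startswith e "system." = true
  · have h25c : PySem.Chars.startswith e.toList (['s','y','s','t','e','m'] ++ ['.']) = true := by
      rw [← show ("system." : String).toList = ['s','y','s','t','e','m'] ++ ['.'] from by decide]; simpa using h25
    obtain ⟨htw, hdot⟩ := (startswith_dot_iff e.toList ['s','y','s','t','e','m'] (by decide)).mp h25c
    have hc : e.toList.contains '.' = true := by simpa using hdot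
    have hS : String.ofList ['s','y','s','t','e','m'] = "system" := by decide
    simp [navSections, List.find?, moduleToKey, PySem.Dict.getD, PySem.Dict.get?,
          h0, h1, h2, h3, h4, h5, h6, h7, h8, h9, h10, h11, h12, h13, h14, h15, h16, h17, h18, h19,
          htw, hS]
    all_goals simp_all
  rw [Bool.not_eq_true] at h25
  -- fallback: no exact item, no known prefix
  have conv : ∀ (p : String) (cs : List Char), p.toList = cs → PySem.Str.startswith e p = false →
      PySem.Chars.startswith e.toList cs = false := by
    intro p cs hpc h; rw [← hpc]; simpa using h
  by_cases hdot : '.' ∈ e.toList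
  · have tw_ne : ∀ p : List Char, '.' ∉ p →
        PySem.Chars.startswith e.toList (p ++ ['.']) = false →
        e.toList.takeWhile (fun c => !(c == '.')) ≠ p := by
      intro p hp hsw htw
      have := (startswith_dot_iff e.toList p hp).mpr ⟨htw, hdot⟩
      rw [hsw] at this; exact Bool.false_ne_true this
    have h20c := conv "stats." ['s','t','a','t','s','.'] (by decide) h20
    have h21c := conv "lending." ['l','e','n','d','i','n','g','.'] (by decide) h21
    have h22c := conv "books." ['b','o','o','k','s','.'] (by decide) h22
    have h23c := conv "categories." ['c','a','t','e','g','o','r','i','e','s','.'] (by decide) h23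
    have h24c := conv "readers." ['r','e','a','d','e','r','s','.'] (by decide) h24
    have h25c := conv "system." ['s','y','s','t','e','m','.'] (by decide) h25
    have k1 := beq_ofList_false "stats" _ (tw_ne ['s','t','a','t','s'] (by decide) h20c)
    have k2 := beq_ofList_false "lending" _ (tw_ne ['l','e','n','d','i','n','g'] (by decide) h21c)
    have k3 := beq_ofList_false "books" _ (tw_ne ['b','o','o','k','s'] (by decide) h22c)
    have k4 := beq_ofList_false "categories" _ (tw_ne ['c','a','t','e','g','o','r','i','e','s'] (by decide) h23c)
    have k5 := beq_ofList_false "readers" _ (tw_ne ['r','e','a','d','e','r','s'] (by decide) h24c)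
    have k6 := beq_ofList_false "system" _ (tw_ne ['s','y','s','t','e','m'] (by decide) h25c)
    simp [navSections, List.find?, moduleToKey, PySem.Dict.getD, PySem.Dict.get?,
          h0, h1, h2, h3, h4, h5, h6, h7, h8, h9, h10, h11, h12, h13, h14, h15, h16, h17, h18, h19, h20c, h21c, h22c, h23c, h24c, h25c, k1, k2, k3, k4, k5, k6, hdot]
  · have h20c := conv "stats." ['s','t','a','t','s','.'] (by decide) h20
    have h21c := conv "lending." ['l','e','n','d','i','n','g','.'] (by decide) h21
    have h22c := conv "books." ['b','o','o','k','s','.'] (by decide) h22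
    have h23c := conv "categories." ['c','a','t','e','g','o','r','i','e','s','.'] (by decide) h23
    have h24c := conv "readers." ['r','e','a','d','e','r','s','.'] (by decide) h24
    have h25c := conv "system." ['s','y','s','t','e','m','.'] (by decide) h25
    simp [navSections, List.find?,
          h0, h1, h2, h3, h4, h5, h6, h7, h8, h9, h10, h11, h12, h13, h14, h15, h16, h17, h18, h19, h20c, h21c, h22c, h23c, h24c, h25c, hdot]
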